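-- pv_equiv track=rewrite | github.com/Apoorva2597/Breast_Restore | export_one_patient_deid_bundle.py | detect_deid_text_col
-- ===== SOURCE A (Python) =====
-- def _safe_str(x):
--     if x is None:
--         return ""
--     try:
--         return str(x)
--     except Exception:
--         return ""
--
-- def detect_deid_text_col(columns):
--     candidates = []
--     for c in columns:
--         uc = _safe_str(c).strip().upper()
--         if uc in ("NOTE_TEXT_DEID", "NOTE_DEID", "TEXT_DEID", "NOTE_TEXT_DEIDENTIFIED"):
--             return c
--         if "DEID" in uc or "DE-ID" in uc or "DE_IDENT" in uc:
--             candidates.append(c)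
--     for c in candidates:
--         uc = _safe_str(c).upper()
--         if "NOTE" in uc and "TEXT" in uc:
--             return c
--     return candidates[0] if candidates else None
-- ===== SOURCE B (Python) =====
-- def detect_deid_text_col(columns):
--     # Single pass: remember first NOTE+TEXT candidate and first candidate overall.
--     first_nt = None
--     first_cand = None
--     for c in columns:
--         s = "" if c is None else str(c)
--         uc = s.strip().upper()
--         if uc in ("NOTE_TEXT_DEID", "NOTE_DEID", "TEXT_DEID", "NOTE_TEXT_DEIDENTIFIED"):
--             return c
--         if "DEID" in uc or "DE-ID" in uc or "DE_IDENT" in uc: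
--             if first_cand is None:
--                 first_cand = c
--             if first_nt is None:
--                 u = s.upper()
--                 if "NOTE" in u and "TEXT" in u:
--                     first_nt = c
--     return first_nt if first_nt is not None else first_cand
-- ===== Notes on version B (the rewrite author's own statement) =====
-- stated objective: alternative
-- what changed: Replaces A's two sequential passes (collect candidates, then rescan for NOTE+TEXT, then fall back to candidates[0]) with a single scan that tracks first-seen NOTE+TEXT candidate and first-seen candidate, so no candidate list is built.
import Mathlib
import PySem

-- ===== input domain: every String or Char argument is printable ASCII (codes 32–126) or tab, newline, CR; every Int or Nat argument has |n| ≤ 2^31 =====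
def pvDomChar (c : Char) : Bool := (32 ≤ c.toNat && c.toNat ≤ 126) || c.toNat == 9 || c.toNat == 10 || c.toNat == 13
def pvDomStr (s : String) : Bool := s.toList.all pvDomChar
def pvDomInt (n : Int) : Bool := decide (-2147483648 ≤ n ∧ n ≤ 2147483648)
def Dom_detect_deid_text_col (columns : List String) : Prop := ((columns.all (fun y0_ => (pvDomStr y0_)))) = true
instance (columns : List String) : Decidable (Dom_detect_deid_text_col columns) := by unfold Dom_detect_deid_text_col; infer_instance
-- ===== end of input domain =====

-- ===== PORT A =====
-- B restructures A's two passes into one scan; equivalence is return-value only (no mutation).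
-- _safe_str: on String inputs (the declared type) str(x) is the identity and x is never None.
def safe_str_detect (x : String) : String := x

def detect_exact (uc : String) : Bool :=
  uc == "NOTE_TEXT_DEID" || uc == "NOTE_DEID" || uc == "TEXT_DEID" || uc == "NOTE_TEXT_DEIDENTIFIED"

def detect_isCand (uc : String) : Bool :=
  PySem.Str.isIn "DEID" uc || PySem.Str.isIn "DE-ID" uc || PySem.Str.isIn "DE_IDENT" uc

-- second loop's test: "NOTE" in uc and "TEXT" in uc on the un-stripped upper-case string
def detect_ntPred (c : String) : Bool :=
  let uc := PySem.Str.upper (safe_str_detect c)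
  PySem.Str.isIn "NOTE" uc && PySem.Str.isIn "TEXT" uc

-- 'for c in candidates: if …: return c'
def detect_loop2 : List String → Option String
  | [] => none
  | c :: rest => if detect_ntPred c then some c else detect_loop2 rest

-- 'return candidates[0] if candidates else None' after loop2 fell through
def detect_finish (candidates : List String) : Option String :=
  match detect_loop2 candidates with
  | some c => some c
  | none => candidates.head?

-- first loop, carrying the growing candidates list
def detect_loop1 : List String → List String → Option String
  | [], candidates => detect_finish candidates
  | c :: rest, candidates =>
    let uc := PySem.Str.upper (PySem.Str.strip (safe_str_detect c))
    if detect_exact uc then some c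
    else if detect_isCand uc then detect_loop1 rest (candidates ++ [c])
    else detect_loop1 rest candidates

def detect_deid_text_col (columns : List String) : Option String :=
  detect_loop1 columns []

-- ===== PORT B =====
-- single pass with state (first_nt, first_cand)
def detect_alt_loop : List String → Option String → Option String → Option String
  | [], first_nt, first_cand =>
    match first_nt with
    | some c => some c
    | none => first_cand
  | c :: rest, first_nt, first_cand =>
    let s := c
    let uc := PySem.Str.upper (PySem.Str.strip s)
    if detect_exact uc then some c
    else if detect_isCand uc then
      let first_cand' := if first_cand.isNone then some c else first_cand
      let first_nt' :=
        if first_nt.isNone then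
          let u := PySem.Str.upper s
          if PySem.Str.isIn "NOTE" u && PySem.Str.isIn "TEXT" u then some c else first_nt
        else first_nt
      detect_alt_loop rest first_nt' first_cand'
    else detect_alt_loop rest first_nt first_cand

def detect_deid_text_col_alt (columns : List String) : Option String :=
  detect_alt_loop columns none none

-- ===== PRECONDITION & SPEC =====
def Spec_detect_deid_text_col (columns : List String) (out : Option String) : Prop := out = detect_deid_text_col_alt columns
instance (columns : List String) (out : Option String) : Decidable (Spec_detect_deid_text_col columns out) := by unfold Spec_detect_deid_text_col; infer_instance

-- ===== CLAIM (what is proved, stated in full; the proofs are below) =====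
def Claim_equal_detect_deid_text_col : Prop := ∀ (columns : List String), Dom_detect_deid_text_col columns → Spec_detect_deid_text_col columns (detect_deid_text_col columns)

-- ===== LEMMAS AND PROOFS =====

lemma detect_loop2_append (l1 l2 : List String) :
    detect_loop2 (l1 ++ l2) = (detect_loop2 l1).or (detect_loop2 l2) := by
  induction l1 with
  | nil => simp [detect_loop2]
  | cons c rest ih =>
    simp only [List.cons_append, detect_loop2]
    split <;> simp [ih]

-- invariant: resuming loop1 with candidates acc equals resuming B's loop with
-- first_nt = loop2 acc and first_cand = acc.head?
lemma detect_invariant (rest : List String) :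
    ∀ acc : List String,
      detect_loop1 rest acc = detect_alt_loop rest (detect_loop2 acc) acc.head? := by
  induction rest with
  | nil =>
    intro acc
    simp only [detect_loop1, detect_alt_loop, detect_finish]
  | cons c tail ih =>
    intro acc
    simp only [detect_loop1, detect_alt_loop, safe_str_detect]
    split
    · rfl
    · split
      · rw [ih (acc ++ [c])]
        have h1 : detect_loop2 (acc ++ [c]) =
            (if (detect_loop2 acc).isNone then
              (if PySem.Str.isIn "NOTE" (PySem.Str.upper c) && PySem.Str.isIn "TEXT" (PySem.Str.upper c)
                then some c else detect_loop2 acc)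
              else detect_loop2 acc) := by
          rw [detect_loop2_append]
          cases h : detect_loop2 acc <;>
            simp [detect_loop2, detect_ntPred, safe_str_detect, Option.or]
        have h2 : (acc ++ [c]).head? = (if acc.head?.isNone then some c else acc.head?) := by
          cases acc <;> simp
        rw [h1, h2]
      · exact ih acc

-- ===== VERDICT (by name: the statement is the Claim_ definition above) =====
theorem detect_deid_text_col_spec : Claim_equal_detect_deid_text_col := by
  intro columns _
  show detect_deid_text_col columns = detect_deid_text_col_alt columns
  unfold detect_deid_text_col detect_deid_text_col_alt
  simpa [detect_loop2] using detect_invariant columns []
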